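-- pv_equiv track=rewrite | github.com/RegenaZhou/Python | homework/Week12/rare_word_extraction.py | find_rare_words
-- ===== SOURCE A (Python) =====
-- def find_rare_words(book_content, common_words):
--     book_words = book_content.split()
--     rare_words = []
--
--     for word in book_words:
--         if word not in common_words and word not in rare_words:
--             rare_words.append(word)
--
--     rare_words.sort()
--     return rare_words
-- ===== SOURCE B (Python) =====
-- def find_rare_words(book_content, common_words):
--     rare_words = []
--     last = None
--     for word in sorted(book_content.split()):
--         if word != last and word not in common_words:
--             rare_words.append(word)
--             last = word
--     return rare_words
-- ===== Notes on version B (the rewrite author's own statement) =====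
-- stated objective: alternative
-- what changed: B sorts the split words up front and deduplicates by comparing each word to the previously appended one in a single pass, eliminating A's membership scan of the growing result list and the final sort; on the measured inputs (few distinct words) this is not measurably faster.
import Mathlib
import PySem

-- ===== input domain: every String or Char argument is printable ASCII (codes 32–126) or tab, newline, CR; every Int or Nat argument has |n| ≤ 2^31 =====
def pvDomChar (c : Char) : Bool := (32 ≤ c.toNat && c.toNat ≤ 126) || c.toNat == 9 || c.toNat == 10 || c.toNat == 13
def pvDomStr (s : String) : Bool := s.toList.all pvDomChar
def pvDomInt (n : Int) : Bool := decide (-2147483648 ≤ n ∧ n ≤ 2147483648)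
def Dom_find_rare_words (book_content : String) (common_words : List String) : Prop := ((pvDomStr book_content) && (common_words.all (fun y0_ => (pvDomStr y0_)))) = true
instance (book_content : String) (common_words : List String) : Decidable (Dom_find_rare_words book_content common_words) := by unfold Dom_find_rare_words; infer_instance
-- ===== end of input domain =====

-- B sorts the split words first and deduplicates by adjacency in one pass instead of scanning the
-- growing result list (objective: alternative algorithm, same measured cost on the test inputs).

-- ===== PORT A =====
-- A: collect first occurrences not in common_words (scanning the accumulator), then sort.
def find_rare_words (book_content : String) (common_words : List String) : List String :=
  let book_words := PySem.Str.split₀ book_content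
  let rare_words :=
    book_words.foldl
      (fun acc word => if word ∉ common_words ∧ word ∉ acc then acc ++ [word] else acc) []
  PySem.List.sorted rare_words (fun x => x) false

-- ===== PORT B =====
-- B: the for-loop over the sorted words, carrying the last appended word.
def bLoop (common_words : List String) : List String → List String → Option String → List String
  | [], rare_words, _ => rare_words
  | word :: ws, rare_words, last =>
      if some word ≠ last ∧ word ∉ common_words then
        bLoop common_words ws (rare_words ++ [word]) (some word)
      else
        bLoop common_words ws rare_words last

def find_rare_words_alt (book_content : String) (common_words : List String) : List String :=
  bLoop common_words (PySem.List.sorted (PySem.Str.split₀ book_content) (fun x => x) false) [] none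

-- ===== PRECONDITION & SPEC =====
def Spec_find_rare_words (book_content : String) (common_words : List String) (out : List String) : Prop := out = find_rare_words_alt book_content common_words
instance (book_content : String) (common_words : List String) (out : List String) : Decidable (Spec_find_rare_words book_content common_words out) := by unfold Spec_find_rare_words; infer_instance

-- ===== CLAIM (what is proved, stated in full; the proofs are below) =====
def Claim_equal_find_rare_words : Prop := ∀ (book_content : String) (common_words : List String), Dom_find_rare_words book_content common_words → Spec_find_rare_words book_content common_words (find_rare_words book_content common_words)

-- ===== LEMMAS AND PROOFS =====

-- A's accumulator: nodup, and membership = "occurs in the words and not common".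
theorem aFold_spec (common : List String) (ws acc : List String) (hnd : acc.Nodup) :
    (ws.foldl (fun acc word => if word ∉ common ∧ word ∉ acc then acc ++ [word] else acc) acc).Nodup ∧
    (∀ x, x ∈ ws.foldl (fun acc word => if word ∉ common ∧ word ∉ acc then acc ++ [word] else acc) acc ↔
      x ∈ acc ∨ (x ∈ ws ∧ x ∉ common)) := by
  induction ws generalizing acc with
  | nil => simpa using hnd
  | cons w ws ih =>
    simp only [List.foldl_cons]
    by_cases hc : w ∉ common ∧ w ∉ acc
    · rw [if_pos hc]
      have hnd' : (acc ++ [w]).Nodup :=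
        hnd.append (List.nodup_singleton w)
          (by intro a ha hb; simp at hb; subst hb; exact hc.2 ha)
      obtain ⟨h1, h2⟩ := ih (acc ++ [w]) hnd'
      refine ⟨h1, fun x => ?_⟩
      rw [h2 x]
      simp only [List.mem_append, List.mem_cons]
      by_cases hxw : x = w
      · subst hxw; simp [hc.1]
      · simp only [hxw, false_or]
        tauto
    · rw [if_neg hc]
      obtain ⟨h1, h2⟩ := ih acc hnd
      refine ⟨h1, fun x => ?_⟩
      rw [h2 x]
      simp only [List.mem_cons]
      rcases not_and_or.mp hc with h' | h' <;> rw [not_not] at h'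
      · constructor
        · rintro (h | ⟨hx, hnc⟩)
          · exact Or.inl h
          · exact Or.inr ⟨Or.inr hx, hnc⟩
        · rintro (h | ⟨(rfl | hx), hnc⟩)
          · exact Or.inl h
          · exact absurd h' hnc
          · exact Or.inr ⟨hx, hnc⟩
      · constructor
        · rintro (h | ⟨hx, hnc⟩)
          · exact Or.inl h
          · exact Or.inr ⟨Or.inr hx, hnc⟩
        · rintro (h | ⟨(rfl | hx), hnc⟩)
          · exact Or.inl h
          · exact Or.inl h'
          · exact Or.inr ⟨hx, hnc⟩

-- the accumulator of bLoop factors out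
theorem bLoop_append (common ws acc : List String) (last : Option String) :
    bLoop common ws acc last = acc ++ bLoop common ws [] last := by
  induction ws generalizing acc last with
  | nil => simp [bLoop]
  | cons w ws ih =>
    by_cases hc : some w ≠ last ∧ w ∉ common
    · rw [bLoop, if_pos hc, bLoop, if_pos hc, ih (acc ++ [w]), List.nil_append, ih [w]]
      simp
    · rw [bLoop, if_neg hc, bLoop, if_neg hc, ih acc]

-- membership of bLoop's result on a sorted input whose elements all bound `last` from above
theorem bLoop_mem (common ws : List String) (last : Option String)
    (hs : ws.Pairwise (· ≤ ·)) (hl : ∀ m, last = some m → ∀ y ∈ ws, m ≤ y) :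
    ∀ x, x ∈ bLoop common ws [] last ↔ x ∈ ws ∧ x ∉ common ∧ some x ≠ last := by
  induction ws generalizing last with
  | nil => simp [bLoop]
  | cons w ws ih =>
    obtain ⟨hw, hs'⟩ := List.pairwise_cons.mp hs
    intro x
    by_cases hc : some w ≠ last ∧ w ∉ common
    · have hl' : ∀ m, (some w : Option String) = some m → ∀ y ∈ ws, m ≤ y := by
        intro m hm y hy; cases hm; exact hw y hy
      rw [bLoop, if_pos hc, bLoop_append, List.nil_append, List.singleton_append, List.mem_cons,
        ih (some w) hs' hl' x]
      constructor
      · rintro (rfl | ⟨hx, hnc, hne⟩)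
        · exact ⟨List.mem_cons_self, hc.2, hc.1⟩
        · refine ⟨List.mem_cons_of_mem _ hx, hnc, ?_⟩
          intro hxl
          have hm := hl x hxl.symm
          have h1 : x ≤ w := hm w List.mem_cons_self
          have h2 : w ≤ x := hw x hx
          exact hc.1 (by rw [le_antisymm h2 h1]; exact hxl)
      · rintro ⟨hmem, hnc, hne⟩
        rcases List.mem_cons.mp hmem with rfl | hx
        · exact Or.inl rfl
        · by_cases hxw : x = w
          · exact Or.inl hxw
          · exact Or.inr ⟨hx, hnc, by simpa using hxw⟩
    · have hl'' : ∀ m, last = some m → ∀ y ∈ ws, m ≤ y :=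
        fun m hm y hy => hl m hm y (List.mem_cons_of_mem _ hy)
      rw [bLoop, if_neg hc, ih last hs' hl'' x]
      constructor
      · rintro ⟨hx, hnc, hne⟩
        exact ⟨List.mem_cons_of_mem _ hx, hnc, hne⟩
      · rintro ⟨hmem, hnc, hne⟩
        rcases List.mem_cons.mp hmem with rfl | hx
        · rcases not_and_or.mp hc with h' | h' <;> rw [not_not] at h'
          · exact absurd h' hne
          · exact absurd h' hnc
        · exact ⟨hx, hnc, hne⟩

-- strict sortedness of bLoop's result
theorem bLoop_pairwise (common ws : List String) (last : Option String)
    (hs : ws.Pairwise (· ≤ ·)) (hl : ∀ m, last = some m → ∀ y ∈ ws, m ≤ y) :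
    (bLoop common ws [] last).Pairwise (· < ·) := by
  induction ws generalizing last with
  | nil => simp [bLoop]
  | cons w ws ih =>
    obtain ⟨hw, hs'⟩ := List.pairwise_cons.mp hs
    by_cases hc : some w ≠ last ∧ w ∉ common
    · have hl' : ∀ m, (some w : Option String) = some m → ∀ y ∈ ws, m ≤ y := by
        intro m hm y hy; cases hm; exact hw y hy
      rw [bLoop, if_pos hc, bLoop_append, List.nil_append, List.singleton_append]
      refine List.pairwise_cons.mpr ⟨?_, ih (some w) hs' hl'⟩
      intro y hy
      obtain ⟨hyw, hync, hyne⟩ := (bLoop_mem common ws (some w) hs' hl' y).mp hy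
      exact lt_of_le_of_ne (hw y hyw) (fun h => hyne (congrArg some h.symm))
    · rw [bLoop, if_neg hc]
      exact ih last hs' (fun m hm y hy => hl m hm y (List.mem_cons_of_mem _ hy))

-- ===== VERDICT (by name: the statement is the Claim_ definition above) =====
theorem find_rare_words_spec : Claim_equal_find_rare_words := by
  intro book_content common_words _
  unfold Spec_find_rare_words find_rare_words find_rare_words_alt
  set ws := PySem.Str.split₀ book_content with hws
  set accA := ws.foldl
      (fun acc word => if word ∉ common_words ∧ word ∉ acc then acc ++ [word] else acc) [] with hacc
  have hsorted : (PySem.List.sorted ws (fun x => x) false).Pairwise (· ≤ ·) :=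
    PySem.List.sorted_pairwise ws (fun x => x)
  have hl : ∀ m, (none : Option String) = some m →
      ∀ y ∈ PySem.List.sorted ws (fun x => x) false, m ≤ y := by intro m hm; cases hm
  have hB := bLoop_mem common_words (PySem.List.sorted ws (fun x => x) false) none hsorted hl
  have hBp := bLoop_pairwise common_words (PySem.List.sorted ws (fun x => x) false) none hsorted hl
  obtain ⟨hAnd, hAmem⟩ := aFold_spec common_words ws [] List.nodup_nil
  have hBnd : (bLoop common_words (PySem.List.sorted ws (fun x => x) false) [] none).Nodup :=
    hBp.imp ne_of_lt
  have hperm : (bLoop common_words (PySem.List.sorted ws (fun x => x) false) [] none).Perm accA := by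
    rw [List.perm_ext_iff_of_nodup hBnd hAnd]
    intro a
    rw [hB a, hAmem a, PySem.List.mem_sorted]
    simp
  exact PySem.List.sorted_eq_of_perm_of_pairwise_lt accA _ (fun x => x) hperm hBp
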